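-- pv_equiv track=rewrite | github.com/dutenrapha/codingame | codingame_v1.py | snaffle_near_hotzone
-- ===== SOURCE A (Python) =====
-- def snaffle_near_hotzone(deallocated_snaffles):
--
--     x_hotest_snaffle = -1
--     id_hotest_snaffle = -1
--     hoteste_zone = -1
--
--     for id_snaffle, x_snaffle, y_snaffle in deallocated_snaffles:
--
--         if (x_snaffle <=3000 and x_snaffle >=500):
--             x_hotest_snaffle = x_snaffle
--             id_hotest_snaffle = id_snaffle
--             hoteste_zone = 0
--         elif (x_snaffle >=13000 and x_snaffle<=15500):
--             x_hotest_snaffle = x_snaffle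
--             id_hotest_snaffle = id_snaffle
--             hoteste_zone = 1
--
--
--     return hoteste_zone, id_hotest_snaffle, x_hotest_snaffle
-- ===== SOURCE B (Python) =====
-- def snaffle_near_hotzone(deallocated_snaffles):
--     # Scan in reverse and return the first (= last overall) snaffle in a hot zone.
--     for id_snaffle, x_snaffle, y_snaffle in reversed(deallocated_snaffles):
--         if 500 <= x_snaffle <= 3000:
--             return 0, id_snaffle, x_snaffle
--         if 13000 <= x_snaffle <= 15500:
--             return 1, id_snaffle, x_snaffle
--     return -1, -1, -1
-- ===== Notes on version B (the rewrite author's own statement) =====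
-- stated objective: alternative
-- what changed: Replaced the forward sweep that keeps overwriting an accumulator with a reverse scan that early-returns at the first snaffle found in a hot zone.
import Mathlib
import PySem

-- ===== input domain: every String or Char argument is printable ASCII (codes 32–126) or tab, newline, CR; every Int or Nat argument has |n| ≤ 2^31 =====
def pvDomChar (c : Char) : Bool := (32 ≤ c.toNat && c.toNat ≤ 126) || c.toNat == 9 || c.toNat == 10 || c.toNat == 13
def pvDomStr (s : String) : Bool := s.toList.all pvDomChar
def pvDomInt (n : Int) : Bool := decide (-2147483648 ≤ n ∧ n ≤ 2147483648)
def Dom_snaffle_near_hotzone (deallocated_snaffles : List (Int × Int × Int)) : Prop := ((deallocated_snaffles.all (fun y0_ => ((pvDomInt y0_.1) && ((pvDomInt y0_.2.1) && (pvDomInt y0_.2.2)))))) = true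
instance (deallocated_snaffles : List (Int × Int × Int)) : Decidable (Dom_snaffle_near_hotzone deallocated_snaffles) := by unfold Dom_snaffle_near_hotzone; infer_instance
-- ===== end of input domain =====

-- B replaces A's forward sweep-and-overwrite with a reverse scan that early-returns
-- at the first hot-zone snaffle (objective: alternative decomposition, same cost).

-- ===== PORT A =====
-- forward loop, accumulator (hoteste_zone, id_hotest_snaffle, x_hotest_snaffle) overwritten at each match
def snaffle_near_hotzone (deallocated_snaffles : List (Int × Int × Int)) : Int × Int × Int :=
  deallocated_snaffles.foldl
    (fun acc t =>
      let id_snaffle := t.1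
      let x_snaffle := t.2.1
      if x_snaffle ≤ 3000 ∧ x_snaffle ≥ 500 then (0, id_snaffle, x_snaffle)
      else if x_snaffle ≥ 13000 ∧ x_snaffle ≤ 15500 then (1, id_snaffle, x_snaffle)
      else acc)
    (-1, -1, -1)

-- ===== PORT B =====
-- reverse scan with early return at the first hot-zone snaffle
def snaffle_alt_go : List (Int × Int × Int) → Int × Int × Int
  | [] => (-1, -1, -1)
  | (id_snaffle, x_snaffle, _) :: rest =>
    if 500 ≤ x_snaffle ∧ x_snaffle ≤ 3000 then (0, id_snaffle, x_snaffle)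
    else if 13000 ≤ x_snaffle ∧ x_snaffle ≤ 15500 then (1, id_snaffle, x_snaffle)
    else snaffle_alt_go rest

def snaffle_near_hotzone_alt (deallocated_snaffles : List (Int × Int × Int)) : Int × Int × Int :=
  snaffle_alt_go deallocated_snaffles.reverse

-- ===== PRECONDITION & SPEC =====
def Spec_snaffle_near_hotzone (deallocated_snaffles : List (Int × Int × Int)) (out : Int × Int × Int) : Prop := out = snaffle_near_hotzone_alt deallocated_snaffles
instance (deallocated_snaffles : List (Int × Int × Int)) (out : Int × Int × Int) : Decidable (Spec_snaffle_near_hotzone deallocated_snaffles out) := by unfold Spec_snaffle_near_hotzone; infer_instance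

-- ===== CLAIM =====
def Claim_equal_snaffle_near_hotzone : Prop := ∀ (deallocated_snaffles : List (Int × Int × Int)), Dom_snaffle_near_hotzone deallocated_snaffles → Spec_snaffle_near_hotzone deallocated_snaffles (snaffle_near_hotzone deallocated_snaffles)

-- ===== LEMMAS AND PROOFS =====
theorem snaffle_eq (xs : List (Int × Int × Int)) :
    snaffle_near_hotzone xs = snaffle_alt_go xs.reverse := by
  induction xs using List.reverseRecOn with
  | nil => rfl
  | append_singleton ys t ih =>
    obtain ⟨id, x, y⟩ := t
    simp only [snaffle_near_hotzone, List.foldl_append, List.foldl_cons, List.foldl_nil,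
      List.reverse_append, List.reverse_cons, List.reverse_nil, List.nil_append,
      List.cons_append, snaffle_alt_go] at *
    by_cases h1 : x ≤ 3000 ∧ x ≥ 500
    · simp [h1]
    · have h1' : ¬ (500 ≤ x ∧ x ≤ 3000) := fun h => h1 ⟨h.2, h.1⟩
      by_cases h2 : x ≥ 13000 ∧ x ≤ 15500
      · simp [h1, h1', h2]
      · have h2' : ¬ (13000 ≤ x ∧ x ≤ 15500) := h2
        simp [h1, h1', h2, ih]

-- ===== VERDICT =====
theorem snaffle_near_hotzone_spec : Claim_equal_snaffle_near_hotzone := by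
  intro xs _
  unfold Spec_snaffle_near_hotzone snaffle_near_hotzone_alt
  exact snaffle_eq xs
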